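-- pv_equiv track=rewrite | github.com/MrBrantCode/unitest_baseline | mut_generate/mist_train_taco/taco_488/solution.py | count_pairs_with_remainder_greater_than_k
-- ===== SOURCE A (Python) =====
-- def count_pairs_with_remainder_greater_than_k(N: int, K: int) -> int:
--     """
--     Counts the number of pairs (a, b) such that 1 <= a, b <= N and the remainder of a divided by b is greater than or equal to K.
--
--     Parameters:
--     - N (int): The maximum value for a and b.
--     - K (int): The minimum remainder value.
--
--     Returns:
--     - int: The number of valid pairs (a, b).
--     """
--     ans = 0
--     if K == 0:
--         return N ** 2
--
--     for r in range(K, N):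
--         for q in range((N - r) // (r + 1) + 1):
--             if q == 0:
--                 ans += N - r
--             else:
--                 ans += max(0, (N - r) // q - r)
--
--     return ans
-- ===== SOURCE B (Python) =====
-- def count_pairs_with_remainder_greater_than_k(N: int, K: int) -> int:
--     """Counts pairs (a, b), 1 <= a, b <= N, with a % b >= K.
--
--     Single divisor loop: for each b, the values a % b repeat with period b,
--     so the count of a in [1, N] with a % b >= K is
--     (N // b) full periods * (b - K) plus the tail max(0, N % b - K + 1).
--     """
--     if K <= 0:
--         return N * N
--     total = 0
--     for b in range(K + 1, N + 1):
--         total += (N // b) * (b - K) + max(0, N % b - K + 1)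
--     return total
-- ===== Notes on version B (the rewrite author's own statement) =====
-- stated objective: alternative
-- what changed: A enumerates remainder r and quotient q counting divisors per (r,q); B loops once over the divisor b and counts the a in [1,N] with a%b>=K by the closed full-period formula (N//b)*(b-K)+max(0,N%b-K+1), removing the inner quotient loop.
-- outside the precondition, e.g. on count_pairs_with_remainder_greater_than_k(-5, -1): A returns 0, B returns 25; on count_pairs_with_remainder_greater_than_k(3, -1): A raises ZeroDivisionError, B returns 9
import Mathlib
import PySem

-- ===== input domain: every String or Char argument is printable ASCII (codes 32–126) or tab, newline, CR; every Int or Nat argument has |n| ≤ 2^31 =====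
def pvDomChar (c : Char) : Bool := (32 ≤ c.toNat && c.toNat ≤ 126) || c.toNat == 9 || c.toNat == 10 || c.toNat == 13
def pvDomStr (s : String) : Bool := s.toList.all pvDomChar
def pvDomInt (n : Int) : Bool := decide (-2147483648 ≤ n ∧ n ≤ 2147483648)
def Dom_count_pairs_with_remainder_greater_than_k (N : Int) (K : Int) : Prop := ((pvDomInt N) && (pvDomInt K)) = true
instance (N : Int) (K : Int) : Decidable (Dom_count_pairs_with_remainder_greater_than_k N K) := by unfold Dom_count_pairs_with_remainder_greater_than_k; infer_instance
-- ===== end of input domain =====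

-- B replaces A's remainder/quotient double loop by a single divisor loop with a
-- closed per-divisor counting formula (a genuinely different counting of the same pairs).


-- ===== PORT A =====
def count_pairs_with_remainder_greater_than_k (N : Int) (K : Int) : Int :=
  if K = 0 then N ^ 2
  else
    (PySem.List.pyRange K N 1).foldl (fun ans r =>
      (PySem.List.pyRange 0 (PySem.Int.floordiv (N - r) (r + 1) + 1) 1).foldl (fun ans q =>
        if q = 0 then ans + (N - r)
        else ans + max 0 (PySem.Int.floordiv (N - r) q - r)) ans) 0

-- ===== PORT B =====
def count_pairs_with_remainder_greater_than_k_alt (N : Int) (K : Int) : Int :=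
  if K ≤ 0 then N * N
  else
    (PySem.List.pyRange (K + 1) (N + 1) 1).foldl (fun total b =>
      total + (PySem.Int.floordiv N b * (b - K) + max 0 (PySem.Int.mod N b - K + 1))) 0

-- ===== PRECONDITION & SPEC =====
-- Pre_ excludes K < 0 only: there A raises ZeroDivisionError whenever 0 ≤ N (the loop
-- reaches r = -1 inside (N-r)//(r+1)), and for N < 0 the domain is degenerate (no pairs
-- (a,b) with 1 ≤ a,b ≤ N exist): A returns 0 there while B returns N*N.
def Pre_count_pairs_with_remainder_greater_than_k (N : Int) (K : Int) : Prop := 0 ≤ K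
instance (N : Int) (K : Int) : Decidable (Pre_count_pairs_with_remainder_greater_than_k N K) := by unfold Pre_count_pairs_with_remainder_greater_than_k; infer_instance
def pvWitness_count_pairs_with_remainder_greater_than_k : Int × Int := (7, 2)

def Spec_count_pairs_with_remainder_greater_than_k (N : Int) (K : Int) (out : Int) : Prop := out = count_pairs_with_remainder_greater_than_k_alt N K
instance (N : Int) (K : Int) (out : Int) : Decidable (Spec_count_pairs_with_remainder_greater_than_k N K out) := by unfold Spec_count_pairs_with_remainder_greater_than_k; infer_instance

-- ===== CLAIM (what is proved, stated in full; the proofs are below) =====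
def Claim_equal_count_pairs_with_remainder_greater_than_k : Prop := ∀ (N : Int) (K : Int), Dom_count_pairs_with_remainder_greater_than_k N K → Pre_count_pairs_with_remainder_greater_than_k N K → Spec_count_pairs_with_remainder_greater_than_k N K (count_pairs_with_remainder_greater_than_k N K)

-- ===== LEMMAS AND PROOFS =====

lemma pv_sum_map_pyRange_aux (f : Int → Int) (n : Nat) : ∀ (a : Int),
    ((PySem.List.pyRange a (a + (n : Int)) 1).map f).sum = ∑ r ∈ Finset.Ico a (a + (n : Int)), f r := by
  induction n with
  | zero => intro a; simp [PySem.List.pyRange_one_eq_nil]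
  | succ n ih =>
    intro a
    rw [PySem.List.pyRange_one_cons (by omega)]
    have hins : Finset.Ico a (a + ((n+1 : Nat) : Int)) = insert a (Finset.Ico (a+1) ((a+1) + (n : Int))) := by
      ext x; simp [Finset.mem_Ico, Finset.mem_insert]; omega
    rw [hins, Finset.sum_insert (by simp [Finset.mem_Ico])]
    have := ih (a + 1)
    simp only [List.map_cons, List.sum_cons]
    rw [show a + ((n+1 : Nat) : Int) = (a+1) + (n : Int) by push_cast; ring, this]

lemma pv_sum_map_pyRange (f : Int → Int) (a b : Int) :
    ((PySem.List.pyRange a b 1).map f).sum = ∑ r ∈ Finset.Ico a b, f r := by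
  by_cases h : a ≤ b
  · have : b = a + ((b - a).toNat : Int) := by omega
    rw [this, pv_sum_map_pyRange_aux]
  · rw [PySem.List.pyRange_one_eq_nil (by omega), Finset.Ico_eq_empty (by omega)]
    simp

lemma pv_sum_ind_le (a c D : Int) :
    (∑ b ∈ Finset.Ico a c, (if b ≤ D then (1 : Int) else 0)) = max 0 (min c (D + 1) - a) := by
  rw [← Finset.sum_filter]
  have hf : (Finset.Ico a c).filter (fun b => b ≤ D) = Finset.Ico a (min c (D+1)) := by
    ext x; simp [Finset.mem_Ico, Finset.mem_filter]; omega
  rw [hf]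
  simp [Finset.sum_const, Int.card_Ico]
  omega

lemma pv_triangle (K M : Int) (f : Int → Int → Int) :
    (∑ r ∈ Finset.Ico K M, ∑ b ∈ Finset.Ico (r + 1) (M + 1), f r b)
      = ∑ b ∈ Finset.Ico (K + 1) (M + 1), ∑ r ∈ Finset.Ico K b, f r b := by
  have L : ∀ r ∈ Finset.Ico K M, (∑ b ∈ Finset.Ico (r + 1) (M + 1), f r b)
      = ∑ b ∈ Finset.Ico (K + 1) (M + 1), (if r + 1 ≤ b then f r b else 0) := by
    intro r hr
    simp only [Finset.mem_Ico] at hr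
    rw [← Finset.sum_filter]
    congr 1
    ext x; simp [Finset.mem_Ico, Finset.mem_filter]; omega
  rw [Finset.sum_congr rfl L, Finset.sum_comm]
  refine Finset.sum_congr rfl ?_
  intro b hb
  simp only [Finset.mem_Ico] at hb
  rw [← Finset.sum_filter]
  congr 1
  ext x; simp [Finset.mem_Ico]; omega

-- abbreviations for A's inner quantities
def pvQ (N r : Int) : Int := PySem.Int.floordiv (N - r) (r + 1)
def pvH (N r q : Int) : Int := if q = 0 then N - r else max 0 (PySem.Int.floordiv (N - r) q - r)
def pvT (N K b : Int) : Int := PySem.Int.floordiv N b * (b - K) + max 0 (PySem.Int.mod N b - K + 1)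

lemma pv_A_sum (N K : Int) (hK : K ≠ 0) :
    count_pairs_with_remainder_greater_than_k N K
      = ∑ r ∈ Finset.Ico K N, ∑ q ∈ Finset.Ico 0 (pvQ N r + 1), pvH N r q := by
  unfold count_pairs_with_remainder_greater_than_k
  rw [if_neg hK]
  have step1 : ∀ (ans r : Int),
      (PySem.List.pyRange 0 (PySem.Int.floordiv (N - r) (r + 1) + 1) 1).foldl
        (fun ans q => if q = 0 then ans + (N - r)
          else ans + max 0 (PySem.Int.floordiv (N - r) q - r)) ans
      = ans + ∑ q ∈ Finset.Ico 0 (pvQ N r + 1), pvH N r q := by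
    intro ans r
    rw [PySem.List.foldl_congr_mem _
      (fun ans q => if q = 0 then ans + (N - r) else ans + max 0 (PySem.Int.floordiv (N - r) q - r))
      (fun ans q => ans + pvH N r q) ans
      (by intro acc x _; simp only [pvH]; split <;> rfl)]
    rw [PySem.List.foldl_add, pv_sum_map_pyRange]; rfl
  rw [PySem.List.foldl_congr_mem _ _
      (fun ans r => ans + ∑ q ∈ Finset.Ico 0 (pvQ N r + 1), pvH N r q) 0
      (by intro acc x _; exact step1 acc x)]
  rw [PySem.List.foldl_add, pv_sum_map_pyRange, zero_add]

lemma pv_B_sum (N K : Int) (hK : ¬ K ≤ 0) :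
    count_pairs_with_remainder_greater_than_k_alt N K = ∑ b ∈ Finset.Ico (K + 1) (N + 1), pvT N K b := by
  unfold count_pairs_with_remainder_greater_than_k_alt
  rw [if_neg hK, PySem.List.foldl_add, pv_sum_map_pyRange, zero_add]
  rfl

-- floordiv is monotone-bounded: 0 ≤ a, 0 < b → 0 ≤ a // b ≤ a
lemma pv_floordiv_le_self (a b : Int) (ha : 0 ≤ a) (hb : 0 < b) :
    PySem.Int.floordiv a b ≤ a := by
  rw [PySem.Int.floordiv_eq_ediv_of_pos hb]
  exact Int.ediv_le_self b ha

lemma pv_floordiv_nonneg (a b : Int) (ha : 0 ≤ a) (hb : 0 < b) :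
    0 ≤ PySem.Int.floordiv a b := by
  rw [PySem.Int.floordiv_eq_ediv_of_pos hb]
  exact Int.ediv_nonneg ha (le_of_lt hb)

-- A's inner sum over q, for one remainder r, counts pairs (q, b)
lemma pv_inner_r (N r : Int) (hr1 : 1 ≤ r) (hrN : r < N) :
    (∑ q ∈ Finset.Ico 0 (pvQ N r + 1), pvH N r q)
      = ∑ q ∈ Finset.Ico 0 (N + 1), ∑ b ∈ Finset.Ico (r + 1) (N + 1), (if q * b ≤ N - r then (1 : Int) else 0) := by
  have hQN : pvQ N r ≤ N := by
    have := pv_floordiv_le_self (N - r) (r + 1) (by omega) (by omega)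
    unfold pvQ; omega
  have hQ0 : 0 ≤ pvQ N r := pv_floordiv_nonneg _ _ (by omega) (by omega)
  simp only [pvQ] at hQN hQ0 ⊢
  -- extend the q-range: terms beyond the quotient bound vanish
  rw [Finset.sum_subset (Finset.Ico_subset_Ico (le_refl 0)
      (by omega : PySem.Int.floordiv (N - r) (r + 1) + 1 ≤ N + 1))
    (by
      intro q hq hq2
      simp only [Finset.mem_Ico] at hq hq2
      have hq1 : PySem.Int.floordiv (N - r) (r + 1) + 1 ≤ q := by omega
      have hqvlt : PySem.Int.floordiv (N - r) q < r + 1 := by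
        rw [PySem.Int.floordiv_lt_iff_lt_mul (by omega)]
        have h1 : N - r < (PySem.Int.floordiv (N - r) (r + 1) + 1) * (r + 1) := by
          exact (PySem.Int.floordiv_lt_iff_lt_mul (a := N - r) (b := r + 1)
            (q := PySem.Int.floordiv (N - r) (r + 1) + 1) (by omega)).mp (by omega)
        calc N - r < (PySem.Int.floordiv (N - r) (r + 1) + 1) * (r + 1) := h1
          _ ≤ q * (r + 1) := by
              apply mul_le_mul_of_nonneg_right (by omega) (by omega)
          _ = (r + 1) * q := by ring
      unfold pvH
      rw [if_neg (by omega)]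
      omega)]
  -- now each h-term is the b-indicator sum
  refine Finset.sum_congr rfl ?_
  intro q hq
  simp only [Finset.mem_Ico] at hq
  by_cases h0 : q = 0
  · subst h0
    unfold pvH
    rw [if_pos rfl]
    have : ∀ b ∈ Finset.Ico (r + 1) (N + 1), (if (0:Int) * b ≤ N - r then (1:Int) else 0) = 1 := by
      intro b _; rw [if_pos (by omega)]
    rw [Finset.sum_congr rfl this, Finset.sum_const, Int.card_Ico]
    simp
    omega
  · unfold pvH
    rw [if_neg h0]
    have hcong : ∀ b ∈ Finset.Ico (r + 1) (N + 1),
        (if q * b ≤ N - r then (1:Int) else 0) = (if b ≤ PySem.Int.floordiv (N - r) q then (1:Int) else 0) := by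
      intro b _
      have : b ≤ PySem.Int.floordiv (N - r) q ↔ q * b ≤ N - r := by
        rw [PySem.Int.le_floordiv_iff_mul_le (by omega)]
        constructor <;> intro h <;> nlinarith [h]
      by_cases hc : q * b ≤ N - r
      · rw [if_pos hc, if_pos (this.mpr hc)]
      · rw [if_neg hc, if_neg (fun hh => hc (this.mp hh))]
    rw [Finset.sum_congr rfl hcong, pv_sum_ind_le]
    have hD : PySem.Int.floordiv (N - r) q ≤ N - r := pv_floordiv_le_self _ _ (by omega) (by omega)
    omega

-- shifting the dividend by r < b lowers the quotient by the indicator of (N % b < r)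
lemma pv_div_sub (N b r : Int) (hb : 0 < b) (hr : 0 ≤ r) (hrb : r < b) :
    PySem.Int.floordiv (N - r) b
      = PySem.Int.floordiv N b - (if PySem.Int.mod N b < r then 1 else 0) := by
  have hde := PySem.Int.floordiv_mul_add_mod N b
  have he0 := PySem.Int.mod_nonneg N hb
  have helt := PySem.Int.mod_lt N hb
  by_cases hc : PySem.Int.mod N b < r
  · rw [if_pos hc, PySem.Int.floordiv_eq_iff_of_pos hb]
    constructor <;> nlinarith [hde, he0, helt]
  · rw [if_neg hc, PySem.Int.floordiv_eq_iff_of_pos hb]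
    constructor <;> nlinarith [hde, he0, helt]

-- the per-divisor count: summing quotients over the remainders K ≤ r < b gives B's formula
lemma pv_per_b (N K b : Int) (hK : 1 ≤ K) (hb : K + 1 ≤ b) (hbN : b ≤ N) :
    (∑ r ∈ Finset.Ico K b, ∑ q ∈ Finset.Ico 0 (N + 1), (if q * b ≤ N - r then (1 : Int) else 0))
      = pvT N K b := by
  have hb0 : 0 < b := by omega
  have hinner : ∀ r ∈ Finset.Ico K b,
      (∑ q ∈ Finset.Ico 0 (N + 1), (if q * b ≤ N - r then (1 : Int) else 0))
        = PySem.Int.floordiv (N - r) b + 1 := by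
    intro r hr
    simp only [Finset.mem_Ico] at hr
    have hcong : ∀ q ∈ Finset.Ico 0 (N + 1),
        (if q * b ≤ N - r then (1 : Int) else 0)
          = (if q ≤ PySem.Int.floordiv (N - r) b then (1 : Int) else 0) := by
      intro q _
      have hiff := PySem.Int.le_floordiv_iff_mul_le (a := N - r) (b := b) (q := q) hb0
      by_cases hc : q * b ≤ N - r
      · rw [if_pos hc, if_pos (hiff.mpr hc)]
      · rw [if_neg hc, if_neg (fun hh => hc (hiff.mp hh))]
    rw [Finset.sum_congr rfl hcong, pv_sum_ind_le]
    have h1 : 0 ≤ PySem.Int.floordiv (N - r) b := pv_floordiv_nonneg _ _ (by omega) hb0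
    have h2 : PySem.Int.floordiv (N - r) b ≤ N - r := pv_floordiv_le_self _ _ (by omega) hb0
    omega
  rw [Finset.sum_congr rfl hinner]
  have hstep : ∀ r ∈ Finset.Ico K b, PySem.Int.floordiv (N - r) b + 1
      = (PySem.Int.floordiv N b + 1) - (if PySem.Int.mod N b < r then (1 : Int) else 0) := by
    intro r hr; simp only [Finset.mem_Ico] at hr
    rw [pv_div_sub N b r hb0 (by omega) (by omega)]; ring
  rw [Finset.sum_congr rfl hstep, Finset.sum_sub_distrib, Finset.sum_const, Int.card_Ico]
  have hneg : ∀ r ∈ Finset.Ico K b, (if PySem.Int.mod N b < r then (1 : Int) else 0)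
      = 1 - (if r ≤ PySem.Int.mod N b then (1 : Int) else 0) := by
    intro r _
    by_cases hc : PySem.Int.mod N b < r
    · rw [if_pos hc, if_neg (by omega)]; ring
    · rw [if_neg hc, if_pos (by omega)]; ring
  rw [Finset.sum_congr rfl hneg, Finset.sum_sub_distrib, Finset.sum_const, Int.card_Ico, pv_sum_ind_le]
  unfold pvT
  have he0 := PySem.Int.mod_nonneg N hb0
  have helt := PySem.Int.mod_lt N hb0
  simp only [nsmul_eq_mul]
  rw [Int.toNat_of_nonneg (by omega : (0:Int) ≤ b - K)]
  have hM : min b (PySem.Int.mod N b + 1) = PySem.Int.mod N b + 1 := by omega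
  rw [hM]
  have hM2 : max 0 (PySem.Int.mod N b + 1 - K) = max 0 (PySem.Int.mod N b - K + 1) := by omega
  rw [hM2]
  ring

theorem main_eq (N K : Int) (hPre : 0 ≤ K) :
    count_pairs_with_remainder_greater_than_k N K = count_pairs_with_remainder_greater_than_k_alt N K := by
  by_cases h0 : K = 0
  · subst h0
    unfold count_pairs_with_remainder_greater_than_k count_pairs_with_remainder_greater_than_k_alt
    rw [if_pos rfl, if_pos (le_refl 0)]
    ring
  · have hK1 : 1 ≤ K := by omega
    rw [pv_A_sum N K h0, pv_B_sum N K (by omega)]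
    have h1 : ∀ r ∈ Finset.Ico K N, (∑ q ∈ Finset.Ico 0 (pvQ N r + 1), pvH N r q)
        = ∑ b ∈ Finset.Ico (r + 1) (N + 1), ∑ q ∈ Finset.Ico 0 (N + 1), (if q * b ≤ N - r then (1 : Int) else 0) := by
      intro r hr; simp only [Finset.mem_Ico] at hr
      rw [pv_inner_r N r (by omega) (by omega), Finset.sum_comm]
    rw [Finset.sum_congr rfl h1, pv_triangle]
    refine Finset.sum_congr rfl ?_
    intro b hb; simp only [Finset.mem_Ico] at hb
    exact pv_per_b N K b hK1 (by omega) (by omega)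

-- ===== VERDICT (by name: the statement is the Claim_ definition above) =====
theorem count_pairs_with_remainder_greater_than_k_spec : Claim_equal_count_pairs_with_remainder_greater_than_k := by
  intro N K _ hPre
  unfold Spec_count_pairs_with_remainder_greater_than_k
  exact main_eq N K hPre
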